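-- pv_equiv track=rewrite | github.com/Bheinarl/algorithm_course_in_ss_afy | baekjoon/baekjoon_17140이차원배열과연산.py | C_operation
-- ===== SOURCE A (Python) =====
-- def C_operation(arr):
--     row_len = len(arr)
--     col_len = len(arr[0])
--
--     new_cols = []
--     max_len = 0
--
--     # 각 열 처리 (R_operation과 동일한 방법)
--     for c in range(col_len):
--         count = {}
--
--         for r in range(row_len):
--             x = arr[r][c]
--             if x == 0:
--                 continue
--             if x in count:
--                 count[x] += 1
--             else:
--                 count[x] = 1
--
--         pairs = []
--         for num in count:
--             pairs.append((num, count[num]))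
--
--         pairs.sort(key=lambda x: (x[1], x[0]))
--
--         new_col = []
--         for num, cnt in pairs:
--             new_col.append(num)
--             new_col.append(cnt)
--
--         new_col = new_col[:100]
--         max_len = max(max_len, len(new_col))
--         new_cols.append(new_col)
--
--     # 열 패딩
--     for col in new_cols:
--         while len(col) < max_len:
--             col.append(0)
--
--     # 열 -> 행 재구성
--     new_arr = []
--     for r in range(max_len):
--         row = []
--         for c in range(len(new_cols)):
--             row.append(new_cols[c][r])
--         new_arr.append(row)
--
--     return new_arr
-- ===== SOURCE B (Python) =====
-- def C_operation(arr):
--     c0 = len(arr[0])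
--     cols = list(zip(*(row[:c0] for row in arr)))
--
--     new_cols = []
--     for col in cols:
--         # sort the nonzero entries, then run-length encode the sorted list:
--         # equal values are adjacent, so each run is one (count, value) group.
--         vals = sorted(v for v in col if v != 0)
--         runs = []
--         i = 0
--         n = len(vals)
--         while i < n:
--             j = i + 1
--             while j < n and vals[j] == vals[i]:
--                 j += 1
--             runs.append((j - i, vals[i]))
--             i = j
--         runs.sort()  # natural tuple order = by (count, value)
--         new_cols.append([x for cnt, v in runs for x in (v, cnt)][:100])
--
--     m = max(map(len, new_cols), default=0)
--     return [[col[r] if r < len(col) else 0 for col in new_cols] for r in range(m)]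
-- ===== Notes on version B (the rewrite author's own statement) =====
-- stated objective: alternative
-- what changed: Counting is done without any dictionary: each column is transposed out via zip, its nonzero entries are sorted and run-length encoded (equal values become adjacent runs), the (count,value) runs are sorted by the natural tuple order, and the padding loop plus nested index transpose are replaced by one pad-by-conditional comprehension.
import Mathlib
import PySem

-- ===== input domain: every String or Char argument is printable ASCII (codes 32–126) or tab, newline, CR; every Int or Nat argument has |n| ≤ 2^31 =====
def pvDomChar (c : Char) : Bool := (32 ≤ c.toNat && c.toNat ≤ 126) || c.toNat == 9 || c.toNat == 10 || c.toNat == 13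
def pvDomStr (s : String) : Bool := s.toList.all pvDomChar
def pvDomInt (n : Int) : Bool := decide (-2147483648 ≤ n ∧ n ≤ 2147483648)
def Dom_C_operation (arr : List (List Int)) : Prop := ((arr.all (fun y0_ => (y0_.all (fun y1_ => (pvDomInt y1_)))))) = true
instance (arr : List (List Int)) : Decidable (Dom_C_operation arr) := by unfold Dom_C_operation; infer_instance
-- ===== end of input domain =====

-- B counts without any dictionary: it transposes via zip, sorts each column's nonzero entries and
-- run-length encodes the sorted list into (count, value) runs, sorts the runs by the natural tuple
-- order, and pads-and-transposes back in one comprehension. A mutates only lists it creates itself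
-- (never the argument); the equivalence is about the return value.

-- ===== PORT A =====
-- 'while len(col) < max_len: col.append(0)'
def pvPad (col : List Int) (m : Int) : List Int :=
  if (col.length : Int) < m then pvPad (col ++ [0]) m else col
termination_by (m - col.length).toNat
decreasing_by simp [List.length_append]; omega

def C_operation (arr : List (List Int)) : List (List Int) :=
  let row_len : Int := PySem.List.len arr
  let col_len : Int := PySem.List.len (PySem.List.pyGetD arr 0 [])
  let s := (PySem.List.pyRange 0 col_len).foldl (fun s c =>
    let count := (PySem.List.pyRange 0 row_len).foldl (fun count r =>
        let x := PySem.List.pyGetD (PySem.List.pyGetD arr r []) c 0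
        if x = 0 then count
        else if count.contains x then count.insert x (count.getD x 0 + 1)
        else count.insert x 1) (PySem.Dict.empty : PySem.Dict Int Int)
    let pairs := count.keys.foldl (fun ps num => ps ++ [(num, count.getD num 0)]) []
    let pairs := PySem.List.sorted2 pairs (fun p => p.2) (fun p => p.1)
    let new_col := pairs.foldl (fun nc p => nc ++ [p.1, p.2]) []
    let new_col := PySem.List.slice new_col none (some 100)
    (s.1 ++ [new_col], max s.2 (PySem.List.len new_col))) (([] : List (List Int)), (0 : Int))
  let new_cols := s.1.map (fun col => pvPad col s.2)
  (PySem.List.pyRange 0 s.2).foldl (fun rows r =>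
    rows ++ [(PySem.List.pyRange 0 (PySem.List.len new_cols)).foldl
      (fun row c => row ++ [PySem.List.pyGetD (PySem.List.pyGetD new_cols c []) r 0]) []]) []

-- ===== PORT B =====
-- 'zip(*rows)': take heads while no iterable is exhausted
def pvZip (rows : List (List Int)) : List (List Int) :=
  if rows.isEmpty || rows.any List.isEmpty then []
  else rows.map (fun r => r.headD 0) :: pvZip (rows.map List.tail)
termination_by (rows.headD []).length
decreasing_by
  cases rows with
  | nil => simp_all
  | cons r0 t =>
    simp_all
    cases r0 with
    | nil => simp_all
    | cons x xs => simp

-- the two nested while loops: advance j over the run of vals[i], emit (j - i, vals[i])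
def pvRuns (vals : List Int) : List (Int × Int) :=
  match vals with
  | [] => []
  | v :: rest =>
      ((1 + ((rest.takeWhile (fun x => x == v)).length : Int), v))
        :: pvRuns (rest.dropWhile (fun x => x == v))
termination_by vals.length
decreasing_by
  have := List.length_dropWhile_le (fun x => x == v) rest
  simp; omega

def pvBuildColB (col : List Int) : List Int :=
  let vals := PySem.List.sorted (col.filter (fun v => !(v == 0))) (fun x => x) false
  let runs := PySem.List.sorted2 (pvRuns vals) (fun p => p.1) (fun p => p.2)
  PySem.List.slice (runs.flatMap (fun p => [p.2, p.1])) none (some 100)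

def C_operation_alt (arr : List (List Int)) : List (List Int) :=
  let c0 := PySem.List.len (PySem.List.pyGetD arr 0 [])
  let cols := pvZip (arr.map (fun row => PySem.List.slice row none (some c0)))
  let new_cols := cols.map pvBuildColB
  let m := PySem.List.maxD (new_cols.map (fun col => PySem.List.len col)) (fun x => x) 0
  (PySem.List.pyRange 0 m).map (fun r =>
    new_cols.map (fun col => if r < PySem.List.len col then PySem.List.pyGetD col r 0 else 0))

-- ===== PRECONDITION & SPEC =====
-- Pre_ excludes exactly the inputs on which the Python A raises IndexError:
-- the empty list (arr[0]) and grids with a row shorter than the first row (arr[r][c]).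
def Pre_C_operation (arr : List (List Int)) : Prop :=
  arr ≠ [] ∧ ∀ row ∈ arr, (PySem.List.pyGetD arr 0 []).length ≤ row.length
instance (arr : List (List Int)) : Decidable (Pre_C_operation arr) := by unfold Pre_C_operation; infer_instance
def pvWitness_C_operation : List (List Int) := [[1, 2, 1], [0, 2, 3]]
def Spec_C_operation (arr : List (List Int)) (out : List (List Int)) : Prop := out = C_operation_alt arr
instance (arr : List (List Int)) (out : List (List Int)) : Decidable (Spec_C_operation arr out) := by unfold Spec_C_operation; infer_instance

-- ===== CLAIM (what is proved, stated in full; the proofs are below) =====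
def Claim_equal_C_operation : Prop := ∀ (arr : List (List Int)), Dom_C_operation arr → Pre_C_operation arr → Spec_C_operation arr (C_operation arr)

-- ===== LEMMAS AND PROOFS =====

-- the canonical per-column value both sides are reduced to: (value, count) pairs over the
-- ordered-deduplicated nonzero entries, sorted by (count, value), flattened and truncated
def pvColCanon (vals : List Int) : List Int :=
  PySem.List.slice
    ((PySem.List.sorted2 ((PySem.List.dedup vals).map (fun v => (v, (vals.count v : Int))))
        (fun p => p.2) (fun p => p.1)).flatMap (fun p => [p.1, p.2]))
    none (some 100)

def pvColOf (arr : List (List Int)) (c : Int) : List Int :=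
  (arr.map (fun row => PySem.List.pyGetD row c 0)).filter (fun x => !(x == 0))

-- ---------- A-side reduction to pvColCanon ----------

theorem pvPad_eq (col : List Int) (m : Int) :
    pvPad col m = col ++ List.replicate (m - col.length).toNat 0 := by
  fun_induction pvPad col m with
  | case1 col h ih =>
    rw [ih]
    rw [List.append_assoc]
    congr 1
    have h2 : (m - ((col ++ [0]).length : Int)).toNat + 1 = (m - (col.length : Int)).toNat := by
      simp [List.length_append]; omega
    rw [← h2, List.replicate_succ]
    rfl
  | case2 col h =>
    have : (m - (col.length : Int)).toNat = 0 := by omega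
    simp [this]

theorem pvPad_get (col : List Int) (m r : Int) (h0 : 0 ≤ r) :
    PySem.List.pyGetD (pvPad col m) r 0
      = if r < (col.length : Int) then PySem.List.pyGetD col r 0 else 0 := by
  rw [pvPad_eq]
  by_cases hr : r < (col.length : Int)
  · rw [if_pos hr, PySem.List.pyGetD_of_nonneg _ _ h0, PySem.List.pyGetD_of_nonneg _ _ h0]
    rw [List.getD_eq_getElem?_getD, List.getD_eq_getElem?_getD]
    rw [List.getElem?_append_left (by omega)]
  · rw [if_neg hr, PySem.List.pyGetD_of_nonneg _ _ h0]
    rw [List.getD_eq_getElem?_getD]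
    rw [List.getElem?_append_right (by omega)]
    rcases h : (List.replicate (m - (col.length:Int)).toNat (0:Int))[r.toNat - col.length]? with _ | x
    · rfl
    · have := List.getElem?_eq_some_iff.mp h
      rcases this with ⟨hlt, hv⟩
      simp only [List.getElem_replicate] at hv
      simp [← hv]

theorem pvMaxD_eq (xs : List Int) (h : ∀ x ∈ xs, 0 ≤ x) :
    PySem.List.maxD xs (fun x => x) 0 = xs.foldl max 0 := by
  cases xs with
  | nil => simp [PySem.List.maxD, PySem.List.max?]
  | cons x t =>
    rw [PySem.List.maxD, PySem.List.max?_id_cons]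
    have hx : max 0 x = x := by
      have := h x (by simp); omega
    simp [List.foldl_cons, hx]

theorem pvCount_eq (arr : List (List Int)) (c : Int) :
    (PySem.List.pyRange 0 (PySem.List.len arr)).foldl (fun count r =>
          if PySem.List.pyGetD (PySem.List.pyGetD arr r []) c 0 = 0 then count
          else if count.contains (PySem.List.pyGetD (PySem.List.pyGetD arr r []) c 0) then
            count.insert (PySem.List.pyGetD (PySem.List.pyGetD arr r []) c 0)
              (count.getD (PySem.List.pyGetD (PySem.List.pyGetD arr r []) c 0) 0 + 1)
          else count.insert (PySem.List.pyGetD (PySem.List.pyGetD arr r []) c 0) 1)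
        (PySem.Dict.empty : PySem.Dict Int Int)
      = PySem.Dict.counter (pvColOf arr c) := by
  rw [PySem.List.foldl_pyRange_pyGetD arr ([] : List Int)
       (f := fun (count : PySem.Dict Int Int) row =>
          if PySem.List.pyGetD row c 0 = 0 then count
          else if count.contains (PySem.List.pyGetD row c 0) then
            count.insert (PySem.List.pyGetD row c 0) (count.getD (PySem.List.pyGetD row c 0) 0 + 1)
          else count.insert (PySem.List.pyGetD row c 0) 1)
       (init := (PySem.Dict.empty : PySem.Dict Int Int)) le_rfl]
  rw [Int.toNat_zero, List.drop_zero]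
  rw [PySem.List.foldl_congr_mem _ _
      (fun count row =>
        if PySem.List.pyGetD row c 0 ≠ 0 then
          (if count.contains (PySem.List.pyGetD row c 0) then
            count.insert (PySem.List.pyGetD row c 0) (count.getD (PySem.List.pyGetD row c 0) 0 + 1)
           else count.insert (PySem.List.pyGetD row c 0) 1)
        else count) _
      (by intro acc x hx; simp only [ite_not])]
  rw [PySem.List.foldl_ite_eq_foldl_filter]
  rw [PySem.List.foldl_congr_mem _ _
      (fun (count : PySem.Dict Int Int) row =>
        count.insert (PySem.List.pyGetD row c 0) (count.getD (PySem.List.pyGetD row c 0) 0 + 1)) _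
      (by
        intro acc x hx
        by_cases h : acc.contains (PySem.List.pyGetD x c 0)
        · simp [h]
        · simp only [h, if_false, Bool.false_eq_true]
          rw [PySem.Dict.getD_of_not_contains _ _ (by simpa using h)]
          norm_num)]
  rw [← List.foldl_map (f := fun row => PySem.List.pyGetD row c 0)
        (g := fun (count : PySem.Dict Int Int) x => count.insert x (count.getD x 0 + 1))]
  rw [PySem.Dict.foldl_insert_getD_add_one_eq_counter]
  unfold pvColOf
  congr 1
  rw [List.filter_map]
  congr 2
  funext x
  cases h : PySem.List.pyGetD x c 0 == 0 <;> simp_all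

theorem pvColA_eq (arr : List (List Int)) (c : Int) :
    PySem.List.slice
      (List.foldl (fun nc (p : Int × Int) => nc ++ [p.1, p.2]) []
        (PySem.List.sorted2
          (List.foldl (fun ps num =>
              ps ++ [(num,
                ((PySem.List.pyRange 0 (PySem.List.len arr)).foldl (fun count r =>
                    if PySem.List.pyGetD (PySem.List.pyGetD arr r []) c 0 = 0 then count
                    else if count.contains (PySem.List.pyGetD (PySem.List.pyGetD arr r []) c 0) then
                      count.insert (PySem.List.pyGetD (PySem.List.pyGetD arr r []) c 0)
                        (count.getD (PySem.List.pyGetD (PySem.List.pyGetD arr r []) c 0) 0 + 1)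
                    else count.insert (PySem.List.pyGetD (PySem.List.pyGetD arr r []) c 0) 1)
                  (PySem.Dict.empty : PySem.Dict Int Int)).getD num 0)]) []
            ((PySem.List.pyRange 0 (PySem.List.len arr)).foldl (fun count r =>
                if PySem.List.pyGetD (PySem.List.pyGetD arr r []) c 0 = 0 then count
                else if count.contains (PySem.List.pyGetD (PySem.List.pyGetD arr r []) c 0) then
                  count.insert (PySem.List.pyGetD (PySem.List.pyGetD arr r []) c 0)
                    (count.getD (PySem.List.pyGetD (PySem.List.pyGetD arr r []) c 0) 0 + 1)
                else count.insert (PySem.List.pyGetD (PySem.List.pyGetD arr r []) c 0) 1)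
              (PySem.Dict.empty : PySem.Dict Int Int)).keys)
          (fun p => p.2) (fun p => p.1)))
      none (some 100)
    = pvColCanon (pvColOf arr c) := by
  rw [pvCount_eq]
  rw [PySem.List.foldl_append_singleton_eq_map, PySem.Dict.keys_counter, List.nil_append]
  simp only [PySem.Dict.getD_counter]
  rw [PySem.List.foldl_append_eq_flatMap, List.nil_append]
  rfl

-- ---------- B-side reduction to pvColCanon ----------

-- sorted2 is sorted with the lexicographic key (k1, k2)
theorem pvSorted2_eq_sorted_lex (xs : List (Int × Int)) (k1 k2 : Int × Int → Int) :
    PySem.List.sorted2 xs k1 k2 = PySem.List.sorted xs (fun p => toLex (k1 p, k2 p)) := by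
  have hfun : (fun (acc : List (Int × Int)) x =>
        PySem.List.insertBy (fun a b => decide (toLex (k1 a, k2 a) < toLex (k1 b, k2 b))) x acc)
      = (fun (acc : List (Int × Int)) x =>
        PySem.List.insertBy (fun a b =>
          decide (k1 a < k1 b) || (!decide (k1 b < k1 a) && decide (k2 a < k2 b))) x acc) := by
    funext acc x
    congr 1
    funext a b
    by_cases h1 : k1 a < k1 b <;> by_cases h2 : k1 b < k1 a <;> by_cases h3 : k2 a < k2 b <;>
      simp [Prod.Lex.toLex_lt_toLex, h1, h2, h3] <;> omega
  calc PySem.List.sorted2 xs k1 k2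
      = xs.foldl (fun acc x =>
          PySem.List.insertBy (fun a b =>
            decide (k1 a < k1 b) || (!decide (k1 b < k1 a) && decide (k2 a < k2 b))) x acc) [] := rfl
    _ = xs.foldl (fun acc x =>
          PySem.List.insertBy (fun a b => decide (toLex (k1 a, k2 a) < toLex (k1 b, k2 b))) x acc) [] := by
        rw [hfun]
    _ = PySem.List.sorted xs (fun p => toLex (k1 p, k2 p)) := by
        rw [PySem.List.sorted_eq_foldl_insertBy]

theorem pvLt_of_mem_dropWhile (v : Int) (rest : List Int)
    (hle : ∀ x ∈ rest, v ≤ x) (h : rest.Pairwise (· ≤ ·)) :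
    ∀ x ∈ rest.dropWhile (fun x => x == v), v < x := by
  induction rest with
  | nil => simp
  | cons a t ih =>
    by_cases ha : a = v
    · subst ha
      rw [List.dropWhile_cons_of_pos (by simp)]
      exact ih (fun x hx => hle x (by simp [hx])) h.tail
    · rw [List.dropWhile_cons_of_neg (by simpa using ha)]
      intro x hx
      rcases List.mem_cons.mp hx with rfl | hx
      · have := hle x (by simp); omega
      · have h1 := hle a (by simp)
        have h2 := (List.pairwise_cons.mp h).1 x hx
        omega

theorem pvRuns_mem (l : List Int) (h : l.Pairwise (· ≤ ·)) (q : Int × Int) :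
    q ∈ pvRuns l ↔ (q.2 ∈ l ∧ q.1 = (l.count q.2 : Int)) := by
  fun_induction pvRuns l with
  | case1 => simp
  | case2 v rest ih =>
    have hle : ∀ x ∈ rest, v ≤ x := (List.pairwise_cons.mp h).1
    have hdw : ∀ x ∈ rest.dropWhile (fun x => x == v), v < x :=
      pvLt_of_mem_dropWhile v rest hle h.tail
    have hdwp : (rest.dropWhile (fun x => x == v)).Pairwise (· ≤ ·) :=
      h.tail.sublist (List.dropWhile_sublist _)
    have htw : ∀ x ∈ rest.takeWhile (fun x => x == v), x = v := by
      intro x hx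
      simpa using List.mem_takeWhile_imp hx
    have hcv : (v :: rest).count v = 1 + (rest.takeWhile (fun x => x == v)).length := by
      rw [List.count_cons_self]
      have : rest.count v
          = (rest.takeWhile (fun x => x == v)).count v
            + (rest.dropWhile (fun x => x == v)).count v := by
        conv_lhs => rw [← List.takeWhile_append_dropWhile (p := fun x => x == v) (l := rest)]
        rw [List.count_append]
      rw [this]
      have h1 : (rest.takeWhile (fun x => x == v)).count v
          = (rest.takeWhile (fun x => x == v)).length :=
        List.count_eq_length.mpr (fun b hb => (htw b hb).symm)
      have h2 : (rest.dropWhile (fun x => x == v)).count v = 0 := by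
        rw [List.count_eq_zero]
        intro hmem
        have := hdw v hmem; omega
      omega
    have hcx : ∀ x, x ≠ v → (v :: rest).count x = (rest.dropWhile (fun x => x == v)).count x := by
      intro x hx
      rw [List.count_cons_of_ne (Ne.symm hx)]
      conv_lhs => rw [← List.takeWhile_append_dropWhile (p := fun x => x == v) (l := rest)]
      rw [List.count_append]
      have : (rest.takeWhile (fun x => x == v)).count x = 0 := by
        rw [List.count_eq_zero]
        intro hmem
        exact hx (htw x hmem)
      omega
    rw [List.mem_cons, ih hdwp]
    constructor
    · rintro (rfl | ⟨hm, hc⟩)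
      · exact ⟨by simp, by simp [hcv]⟩
      · have hv : q.2 ≠ v := by have := hdw q.2 hm; omega
        refine ⟨?_, ?_⟩
        · exact List.mem_cons.mpr (Or.inr ((List.dropWhile_sublist _).mem hm))
        · rw [hcx q.2 hv]; exact hc
    · rintro ⟨hm, hc⟩
      by_cases hv : q.2 = v
      · left
        have : q.1 = (1 + ((rest.takeWhile (fun x => x == v)).length : Int)) := by
          rw [hc, hv, hcv]; push_cast; ring
        calc q = (q.1, q.2) := rfl
          _ = _ := by rw [this, hv]
      · right
        have hmr : q.2 ∈ rest := by
          rcases List.mem_cons.mp hm with h' | h'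
          · exact absurd h' hv
          · exact h'
        have hmd : q.2 ∈ rest.dropWhile (fun x => x == v) := by
          have : q.2 ∈ rest.takeWhile (fun x => x == v) ∨ q.2 ∈ rest.dropWhile (fun x => x == v) := by
            rw [← List.mem_append, List.takeWhile_append_dropWhile]; exact hmr
          rcases this with h' | h'
          · exact absurd (htw _ h') hv
          · exact h'
        exact ⟨hmd, by rw [← hcx q.2 hv]; exact hc⟩

theorem pvRuns_snd_nodup (l : List Int) (h : l.Pairwise (· ≤ ·)) :
    ((pvRuns l).map Prod.snd).Nodup := by
  fun_induction pvRuns l with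
  | case1 => simp
  | case2 v rest ih =>
    have hle : ∀ x ∈ rest, v ≤ x := (List.pairwise_cons.mp h).1
    have hdw := pvLt_of_mem_dropWhile v rest hle h.tail
    have hdwp : (rest.dropWhile (fun x => x == v)).Pairwise (· ≤ ·) :=
      h.tail.sublist (List.dropWhile_sublist _)
    rw [List.map_cons, List.nodup_cons]
    refine ⟨?_, ih hdwp⟩
    intro hmem
    rcases List.mem_map.mp hmem with ⟨q, hq, hqv⟩
    have := ((pvRuns_mem _ hdwp q).mp hq).1
    have := hdw q.2 this
    omega

theorem pvRuns_perm (l : List Int) (h : l.Pairwise (· ≤ ·)) :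
    (pvRuns l).Perm ((PySem.List.dedup l).map (fun v => ((l.count v : Int), v))) := by
  have hinj : Function.Injective (fun v : Int => ((l.count v : Int), v)) := by
    intro a b hab
    simpa using congrArg Prod.snd hab
  refine (List.perm_ext_iff_of_nodup
    (List.Nodup.of_map Prod.snd (pvRuns_snd_nodup l h))
    (List.Nodup.map hinj (PySem.List.nodup_dedup l))).mpr ?_
  intro q
  rw [pvRuns_mem l h q, List.mem_map]
  constructor
  · rintro ⟨hm, hc⟩
    exact ⟨q.2, (PySem.List.mem_dedup l q.2).mpr hm, by rw [← hc]⟩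
  · rintro ⟨v, hv, rfl⟩
    exact ⟨(PySem.List.mem_dedup l v).mp hv, rfl⟩

theorem pvBuildColB_eq (cs : List Int) :
    pvBuildColB cs = pvColCanon (cs.filter (fun v => !(v == 0))) := by
  unfold pvBuildColB pvColCanon
  dsimp only
  set vals0 := cs.filter (fun v => !(v == 0)) with hvals0
  set s := PySem.List.sorted vals0 (fun x => x) false with hs
  have hsp : s.Perm vals0 := PySem.List.sorted_perm vals0 (fun x => x) false
  have hsorted : s.Pairwise (· ≤ ·) := by
    have := PySem.List.sorted_pairwise vals0 (fun x => x)
    simpa [← hs] using this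
  set PA := (PySem.List.dedup vals0).map (fun v => (v, (vals0.count v : Int))) with hPA
  rw [pvSorted2_eq_sorted_lex (pvRuns s) (fun p => p.1) (fun p => p.2),
      pvSorted2_eq_sorted_lex PA (fun p => p.2) (fun p => p.1)]
  set keyA : Int × Int → Lex (Int × Int) := fun p => toLex (p.2, p.1) with hkeyA
  set sortedA := PySem.List.sorted PA keyA with hsortedA
  have hA_perm : sortedA.Perm PA := PySem.List.sorted_perm PA keyA false
  -- strict pairwise on sortedA
  have hfst_nodup : (sortedA.map Prod.fst).Nodup := by
    have : (PA.map Prod.fst).Nodup := by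
      rw [hPA, List.map_map]
      have : (Prod.fst ∘ fun v : Int => (v, (vals0.count v : Int))) = id := rfl
      rw [this, List.map_id]
      exact PySem.List.nodup_dedup vals0
    exact ((hA_perm.map Prod.fst).nodup_iff).mpr this
  have hne : sortedA.Pairwise (fun a b => a.1 ≠ b.1) := by
    simpa [List.Nodup, List.pairwise_map] using hfst_nodup
  have hle : sortedA.Pairwise (fun a b => keyA a ≤ keyA b) :=
    PySem.List.sorted_pairwise PA keyA
  have hlt : sortedA.Pairwise (fun a b => keyA a < keyA b) := by
    refine (hle.and hne).imp ?_
    rintro a b ⟨h1, h2⟩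
    refine lt_of_le_of_ne h1 ?_
    intro hk
    have := toLex.injective hk
    exact h2 (congrArg Prod.snd this)
  -- the swapped sortedA is the sorted B-side list
  have hmain : PySem.List.sorted (pvRuns s) (fun p => toLex (p.1, p.2)) = sortedA.map Prod.swap := by
    apply PySem.List.sorted_eq_of_perm_of_pairwise_lt
    · -- permutation
      have h1 : (sortedA.map Prod.swap).Perm (PA.map Prod.swap) := hA_perm.map Prod.swap
      have h2 : PA.map Prod.swap = (PySem.List.dedup vals0).map (fun v => ((vals0.count v : Int), v)) := by
        rw [hPA, List.map_map]; rfl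
      have h3 : (pvRuns s).Perm ((PySem.List.dedup s).map (fun v => ((s.count v : Int), v))) :=
        pvRuns_perm s hsorted
      have hcount : (fun v : Int => ((s.count v : Int), v)) = (fun v : Int => ((vals0.count v : Int), v)) := by
        funext v; rw [hsp.count_eq v]
      have hdedup : (PySem.List.dedup s).Perm (PySem.List.dedup vals0) := by
        refine (List.perm_ext_iff_of_nodup (PySem.List.nodup_dedup s) (PySem.List.nodup_dedup vals0)).mpr ?_
        intro a
        rw [PySem.List.mem_dedup, PySem.List.mem_dedup, hsp.mem_iff]
      refine h1.trans ?_
      rw [h2, ← hcount]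
      exact (h3.trans (hdedup.map _)).symm
    · -- pairwise strict
      rw [List.pairwise_map]
      refine hlt.imp ?_
      intro a b hab
      simpa [hkeyA] using hab
  rw [hmain, List.flatMap_map]
  rfl

-- ---------- transpose ----------

theorem pvZip_eq (rows : List (List Int)) (n : Nat) (hne : rows ≠ [])
    (h : ∀ r ∈ rows, r.length = n) :
    pvZip rows = (List.range n).map (fun i => rows.map (fun r => r.getD i 0)) := by
  induction n generalizing rows with
  | zero =>
    rw [pvZip]
    rcases rows with _ | ⟨r0, t⟩
    · simp at hne
    · have : r0.isEmpty := by
        rw [List.isEmpty_iff, ← List.length_eq_zero_iff]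
        exact h r0 (by simp)
      simp [this]
  | succ n ih =>
    rw [pvZip]
    have hnoempty : (rows.isEmpty || rows.any List.isEmpty) = false := by
      simp only [Bool.or_eq_false_iff]
      refine ⟨by simpa [List.isEmpty_iff] using hne, ?_⟩
      rw [List.any_eq_false]
      intro r hr
      have := h r hr
      simp [List.isEmpty_iff, ← List.length_eq_zero_iff, this]
    rw [hnoempty]
    simp only [Bool.false_eq_true, if_false]
    have hne2 : rows.map List.tail ≠ [] := by simpa using hne
    have h2 : ∀ r ∈ rows.map List.tail, r.length = n := by
      intro r hr
      rcases List.mem_map.mp hr with ⟨r0, hr0, rfl⟩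
      have := h r0 hr0
      simp [List.length_tail, this]
    rw [ih (rows.map List.tail) hne2 h2]
    rw [List.range_succ_eq_map, List.map_cons]
    congr 1
    · apply List.map_congr_left
      intro r _
      cases r <;> rfl
    · rw [List.map_map]
      apply List.map_congr_left
      intro i _
      rw [List.map_map]
      apply List.map_congr_left
      intro r _
      show r.tail.getD i 0 = r.getD (Nat.succ i) 0
      cases r <;> simp

-- ---------- main ----------

theorem pvInner (xs : List (List Int)) (r : Int) :
    (PySem.List.pyRange 0 (PySem.List.len xs)).foldl
      (fun row c => row ++ [PySem.List.pyGetD (PySem.List.pyGetD xs c []) r 0]) []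
    = xs.map (fun col => PySem.List.pyGetD col r 0) := by
  rw [PySem.List.foldl_pyRange_pyGetD xs ([] : List Int)
       (f := fun (row : List Int) col => row ++ [PySem.List.pyGetD col r 0])
       (init := ([] : List Int)) le_rfl]
  rw [Int.toNat_zero, List.drop_zero, PySem.List.foldl_append_singleton_eq_map, List.nil_append]

theorem pvColsB_eq (arr : List (List Int)) (hpre : Pre_C_operation arr) :
    (pvZip (arr.map (fun row =>
        PySem.List.slice row none (some (PySem.List.len (PySem.List.pyGetD arr 0 [])))))).map pvBuildColB
    = (PySem.List.pyRange 0 (PySem.List.len (PySem.List.pyGetD arr 0 []))).map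
        (fun c => pvColCanon (pvColOf arr c)) := by
  obtain ⟨hne, hrows⟩ := hpre
  set a0 := PySem.List.pyGetD arr 0 [] with ha0
  set n := a0.length with hn
  have hlen : PySem.List.len a0 = (n : Int) := by rw [PySem.List.len_eq]
  rw [hlen]
  have hslice : arr.map (fun row => PySem.List.slice row none (some ((n : Nat) : Int)))
      = arr.map (fun row => row.take n) := by
    apply List.map_congr_left
    intro row _
    exact PySem.List.slice_to_natCast row n
  rw [hslice]
  have hzip : pvZip (arr.map (fun row => row.take n))
      = (List.range n).map (fun i => (arr.map (fun row => row.take n)).map (fun r => r.getD i 0)) := by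
    apply pvZip_eq
    · simpa using hne
    · intro r hr
      rcases List.mem_map.mp hr with ⟨row, hrow, rfl⟩
      have := hrows row hrow
      simp only [List.length_take]
      omega
  rw [hzip, PySem.List.pyRange_zero_natCast, List.map_map, List.map_map]
  apply List.map_congr_left
  intro i hi
  have hi' : i < n := List.mem_range.mp hi
  show pvBuildColB ((arr.map (fun row => row.take n)).map (fun r => r.getD i 0))
      = pvColCanon (pvColOf arr (i : Int))
  rw [pvBuildColB_eq, List.map_map]
  congr 1
  unfold pvColOf
  congr 1
  apply List.map_congr_left
  intro row _
  show (row.take n).getD i 0 = PySem.List.pyGetD row (i : Int) 0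
  rw [PySem.List.pyGetD_natCast]
  simp [List.getD_eq_getElem?_getD, hi']

theorem pvMain (arr : List (List Int)) (hpre : Pre_C_operation arr) :
    C_operation arr = C_operation_alt arr := by
  simp only [C_operation, C_operation_alt, pvColA_eq]
  rw [pvColsB_eq arr hpre]
  rw [PySem.List.foldl_prod_mk
        (f := fun (l : List (List Int)) c => l ++ [pvColCanon (pvColOf arr c)])
        (g := fun (m : Int) c => max m (PySem.List.len (pvColCanon (pvColOf arr c))))]
  simp only []
  rw [PySem.List.foldl_append_singleton_eq_map, List.nil_append]
  rw [← List.foldl_map (f := fun c => pvColCanon (pvColOf arr c))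
        (g := fun (m : Int) col => max m (PySem.List.len col))]
  set cols := (PySem.List.pyRange 0 (PySem.List.len (PySem.List.pyGetD arr 0 []))).map
      (fun c => pvColCanon (pvColOf arr c)) with hcols
  have hm : PySem.List.maxD (cols.map (fun col => PySem.List.len col)) (fun x => x) 0
      = cols.foldl (fun m col => max m (PySem.List.len col)) 0 := by
    rw [pvMaxD_eq _ (by intro x hx; simp at hx; obtain ⟨a, _, rfl⟩ := hx; simp)]
    rw [List.foldl_map]
  rw [hm]
  set M := cols.foldl (fun m col => max m (PySem.List.len col)) 0 with hM
  simp only [pvInner]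
  rw [PySem.List.foldl_append_singleton_eq_map, List.nil_append]
  apply List.map_congr_left
  intro r hr
  rw [List.map_map]
  apply List.map_congr_left
  intro col hcol
  have hbounds := PySem.List.mem_pyRange_one.mp hr
  have hlen : PySem.List.len col ≤ M := by
    exact (PySem.List.le_foldl_max_int cols (fun col => PySem.List.len col) 0).2 col hcol
  simp only [Function.comp]
  rw [pvPad_get col M r hbounds.1]
  rfl

-- ===== VERDICT (by name: the statement is the Claim_ definition above) =====
theorem C_operation_spec : Claim_equal_C_operation := by
  intro arr _ hpre
  exact pvMain arr hpre
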